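-- pv_equiv track=rewrite | github.com/FelixGruener/Algorithm | Graph/PA1.py | compute_in_degrees
-- ===== SOURCE A (Python) =====
-- def compute_in_degrees(digraph):
-- 	# initializing a empty dictionary to store degrees
-- 	degrees = dict()
-- 	# set degrees all to 0
-- 	for node in digraph:
-- 		degrees[node] = 0
-- 	# calculating all in degrees
-- 	for node in degrees:
-- 		for sourceNode in digraph:
-- 			if node in digraph[sourceNode]:
-- 				degrees[node] += 1
-- 	return degrees
-- ===== SOURCE B (Python) =====
-- def compute_in_degrees(digraph):
--     # count, per distinct head of each adjacency list, how many lists contain it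
--     counts = {}
--     for heads in digraph.values():
--         for h in set(heads):
--             counts[h] = counts.get(h, 0) + 1
--     # assemble the answer by a comprehension over the nodes
--     return {node: counts.get(node, 0) for node in digraph}
-- ===== Notes on version B (the rewrite author's own statement) =====
-- stated objective: faster
-- what changed: A scans every adjacency list once per node (quadratic membership testing); B first builds a counter over the distinct heads of all adjacency lists in one pass, then assembles the result by a comprehension over the nodes reading the counter.
import Mathlib
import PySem

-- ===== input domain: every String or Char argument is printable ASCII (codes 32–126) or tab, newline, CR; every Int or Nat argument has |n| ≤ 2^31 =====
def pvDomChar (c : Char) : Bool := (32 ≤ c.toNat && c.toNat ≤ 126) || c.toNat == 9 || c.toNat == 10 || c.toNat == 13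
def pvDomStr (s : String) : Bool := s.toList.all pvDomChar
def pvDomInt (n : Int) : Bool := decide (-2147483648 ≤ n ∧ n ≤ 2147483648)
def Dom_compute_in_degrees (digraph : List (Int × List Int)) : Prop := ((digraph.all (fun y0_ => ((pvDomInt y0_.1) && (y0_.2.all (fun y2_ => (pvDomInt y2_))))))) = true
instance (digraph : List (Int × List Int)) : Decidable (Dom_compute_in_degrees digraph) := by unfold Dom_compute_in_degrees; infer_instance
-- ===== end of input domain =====

-- B replaces A's per-node scan of every adjacency list by a counter over the distinct
-- heads of all adjacency lists, then reads the counter per node (measurably faster, asymptotic).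


-- ===== PORT A =====
-- for node in digraph: degrees[node] = 0 ; for node in degrees: for sourceNode in digraph:
--   if node in digraph[sourceNode]: degrees[node] += 1
def compute_in_degrees (digraph : List (Int × List Int)) : List (Int × Int) :=
  let g := PySem.Dict.ofList digraph
  let degrees := g.keys.foldl (fun d node => d.insert node 0) PySem.Dict.empty
  (degrees.keys.foldl (fun d node =>
      g.keys.foldl (fun d srcNode =>
        if node ∈ g.getD srcNode [] then d.modify node 0 (· + 1) else d) d) degrees).items

-- ===== PORT B =====
-- counts = {}; for heads in digraph.values(): for h in set(heads): counts[h] = counts.get(h, 0) + 1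
-- return {node: counts.get(node, 0) for node in digraph}
def compute_in_degrees_alt (digraph : List (Int × List Int)) : List (Int × Int) :=
  let g := PySem.Dict.ofList digraph
  let counts := g.values.foldl (fun c heads =>
      (PySem.Set.ofList heads).foldl (fun c h => c.insert h (c.getD h 0 + 1)) c)
    (PySem.Dict.empty : PySem.Dict Int Int)
  g.keys.map (fun node => (node, counts.getD node 0))

-- ===== PRECONDITION & SPEC =====
def Spec_compute_in_degrees (digraph : List (Int × List Int)) (out : List (Int × Int)) : Prop := out = compute_in_degrees_alt digraph
instance (digraph : List (Int × List Int)) (out : List (Int × Int)) : Decidable (Spec_compute_in_degrees digraph out) := by unfold Spec_compute_in_degrees; infer_instance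

-- ===== CLAIM (what is proved, stated in full; the proofs are below) =====
def Claim_equal_compute_in_degrees : Prop := ∀ (digraph : List (Int × List Int)), Dom_compute_in_degrees digraph → Spec_compute_in_degrees digraph (compute_in_degrees digraph)

-- ===== LEMMAS AND PROOFS =====

-- A's inner loop over the sources, for a fixed node: the value at v gains the number of
-- sources whose adjacency list contains node (only at v = node).
theorem pv_innerA_getD (val : Int → List Int) (node v : Int) (l : List Int) :
    ∀ d : PySem.Dict Int Int,
    (l.foldl (fun d src => if node ∈ val src then d.modify node 0 (· + 1) else d) d).getD v 0
      = d.getD v 0 + if v = node then (l.countP (fun src => decide (node ∈ val src)) : Int) else 0 := by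
  induction l with
  | nil => intro d; simp
  | cons src t ih =>
    intro d
    simp only [List.foldl_cons, List.countP_cons]
    by_cases h : node ∈ val src
    · rw [if_pos h, ih, PySem.Dict.getD_modify]
      by_cases hv : v = node
      · subst hv
        simp only [h, decide_true, if_pos]
        push_cast
        omega
      · simp [hv]
    · rw [if_neg h, ih]
      simp [h]

-- A's inner loop does not change the key list when node is already a key.
theorem pv_innerA_keys (val : Int → List Int) (node : Int) (l : List Int) :
    ∀ d : PySem.Dict Int Int, node ∈ d.keys →
    (l.foldl (fun d src => if node ∈ val src then d.modify node 0 (· + 1) else d) d).keys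
      = d.keys := by
  induction l with
  | nil => intro d _; rfl
  | cons src t ih =>
    intro d hmem
    simp only [List.foldl_cons]
    by_cases h : node ∈ val src
    · have hc : d.contains node = true := (PySem.Dict.contains_iff_mem_keys d node).mpr hmem
      have hk : (d.modify node 0 (· + 1)).keys = d.keys := by
        rw [PySem.Dict.keys_modify, PySem.Dict.keys_insert_of_contains _ _ hc]
      simp only [if_pos h]
      rw [ih _ (by rw [hk]; exact hmem), hk]
    · simp only [if_neg h]
      exact ih d hmem

-- A's outer loop over a duplicate-free list of existing nodes.
theorem pv_outerA (val : Int → List Int) (srcs : List Int) (nodes : List Int)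
    (hnd : nodes.Nodup) :
    ∀ d : PySem.Dict Int Int, (∀ n ∈ nodes, n ∈ d.keys) →
    ((nodes.foldl (fun d node =>
        srcs.foldl (fun d src => if node ∈ val src then d.modify node 0 (· + 1) else d) d)
        d).keys = d.keys)
    ∧ ∀ v, (nodes.foldl (fun d node =>
        srcs.foldl (fun d src => if node ∈ val src then d.modify node 0 (· + 1) else d) d)
        d).getD v 0
      = d.getD v 0 + if v ∈ nodes then (srcs.countP (fun src => decide (v ∈ val src)) : Int) else 0 := by
  induction nodes with
  | nil => intro d _; exact ⟨rfl, fun v => by simp⟩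
  | cons node t ih =>
    intro d hmem
    have hnode : node ∈ d.keys := hmem node (by simp)
    have hk1 : (srcs.foldl (fun d src => if node ∈ val src then d.modify node 0 (· + 1) else d) d).keys = d.keys :=
      pv_innerA_keys val node srcs d hnode
    have hndt : t.Nodup := hnd.of_cons
    have hnotmem : node ∉ t := (List.nodup_cons.mp hnd).1
    obtain ⟨ihk, ihv⟩ := ih hndt
      (d := srcs.foldl (fun d src => if node ∈ val src then d.modify node 0 (· + 1) else d) d)
      (by intro n hn; rw [hk1]; exact hmem n (List.mem_cons_of_mem _ hn))
    constructor
    · simpa [hk1] using ihk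
    · intro v
      simp only [List.foldl_cons]
      rw [ihv v, pv_innerA_getD]
      by_cases hv : v = node
      · subst hv
        simp [hnotmem]
      · by_cases hvt : v ∈ t <;> simp [hv, hvt]

-- B's counter loop over all adjacency lists: the count of v is the number of lists containing v.
theorem pv_counterB (vals : List (List Int)) (v : Int) :
    ∀ c : PySem.Dict Int Int,
    (vals.foldl (fun c heads =>
        (PySem.Set.ofList heads).foldl (fun c h => c.insert h (c.getD h 0 + 1)) c) c).getD v 0
      = c.getD v 0 + (vals.countP (fun heads => decide (v ∈ heads)) : Int) := by
  induction vals with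
  | nil => intro c; simp
  | cons heads t ih =>
    intro c
    simp only [List.foldl_cons, List.countP_cons]
    rw [ih, PySem.Dict.getD_foldl_insert_add_one]
    have hcount : ((PySem.Set.ofList heads).count v : Int) = if v ∈ heads then 1 else 0 := by
      by_cases hm : v ∈ heads
      · rw [List.count_eq_one_of_mem (PySem.Set.nodup_ofList heads) ((PySem.Set.mem_ofList heads v).mpr hm)]
        simp [hm]
      · rw [List.count_eq_zero_of_not_mem (fun hc => hm ((PySem.Set.mem_ofList heads v).mp hc))]
        simp [hm]
    rw [hcount]
    by_cases hm : v ∈ heads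
    · simp only [hm, decide_true, if_pos]
      push_cast
      omega
    · simp [hm]

-- the initial dict {node: 0}: its keys are exactly the (duplicate-free) key list …
theorem pv_init_keys (ks : List Int) (hnd : ks.Nodup) :
    (ks.foldl (fun d node => d.insert node 0) (PySem.Dict.empty : PySem.Dict Int Int)).keys = ks := by
  rw [PySem.Dict.keys_foldl_insert ks (fun _ _ => 0) PySem.Dict.empty]
  have h0 : (PySem.Dict.empty : PySem.Dict Int Int).keys = [] := rfl
  rw [h0]
  have : PySem.Set.update ([] : PySem.Set Int) ks = PySem.Set.ofList ks := rfl
  rw [this]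
  exact PySem.Set.ofList_eq_self_of_nodup ks hnd

-- … and every value defaults to 0.
theorem pv_init_getD (ks : List Int) :
    ∀ d : PySem.Dict Int Int, (∀ v, d.getD v 0 = 0) →
    ∀ v, (ks.foldl (fun d node => d.insert node 0) d).getD v 0 = 0 := by
  induction ks with
  | nil => intro d h v; exact h v
  | cons k t ih =>
    intro d h v
    simp only [List.foldl_cons]
    exact ih _ (fun w => by rw [PySem.Dict.getD_insert]; split <;> simp [h w]) v

-- ===== VERDICT (by name: the statement is the Claim_ definition above) =====
theorem compute_in_degrees_spec : Claim_equal_compute_in_degrees := by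
  intro digraph _
  unfold Spec_compute_in_degrees compute_in_degrees compute_in_degrees_alt
  simp only []
  set g := PySem.Dict.ofList digraph with hg
  have hnd : g.keys.Nodup := PySem.Dict.nodup_keys_ofList digraph
  set d0 := g.keys.foldl (fun d node => d.insert node 0) (PySem.Dict.empty : PySem.Dict Int Int) with hd0
  have hk0 : d0.keys = g.keys := pv_init_keys g.keys hnd
  have hv0 : ∀ v, d0.getD v 0 = 0 := pv_init_getD g.keys PySem.Dict.empty (fun _ => rfl)
  rw [hk0]
  -- A side
  obtain ⟨hak, hav⟩ := pv_outerA (fun s => g.getD s []) g.keys g.keys hnd d0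
    (fun n hn => by rw [hk0]; exact hn)
  rw [hk0] at hak
  rw [PySem.Dict.items_eq_map_keys _ (by rw [hak]; exact hnd) 0, hak]
  apply List.map_congr_left
  intro k hkmem
  simp only [Prod.mk.injEq, true_and]
  rw [hav k, hv0 k, pv_counterB]
  simp only [if_pos hkmem, zero_add]
  have hvals : g.values = g.keys.map (fun s => g.getD s []) :=
    PySem.Dict.values_eq_map_keys g hnd []
  rw [hvals, List.countP_map]
  have he : (PySem.Dict.empty : PySem.Dict Int Int).getD k 0 = 0 := rfl
  rw [he, zero_add]
  rfl
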